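-- pv_equiv track=rewrite | github.com/manishjoshi34/pythonProject | AmazonReview.py | selectionOption
-- ===== SOURCE A (Python) =====
-- def selectionOption(depo, query):
--     result = [];
--     if len(query) < 2:
--         return result;
--     query = query.lower()
--     queryList = [query[0:idx] for idx in range(2,len(query)+1,1)]
--     datamap = {key: [] for key in queryList}
--     depo = [word.lower() for word in depo]
--     for word in depo:
--         for key in datamap.keys():
--             subword = word[0:len(key)]
--             if key == subword:
--                 datamap[key].append(word)
--     for item in datamap:
--         data = sorted(datamap[item])
--         result.append(data[:3])
--     return result
-- ===== SOURCE B (Python) =====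
-- def selectionOption(depo, query):
--     n = len(query)
--     if n < 2:
--         return []
--     q = query.lower()
--     buckets = [[] for _ in range(n - 1)]
--     for word in depo:
--         w = word.lower()
--         m = 0
--         while m < n and m < len(w) and w[m] == q[m]:
--             m += 1
--         for L in range(2, m + 1):
--             buckets[L - 2].append(w)
--     return [sorted(b)[:3] for b in buckets]
-- ===== Notes on version B (the rewrite author's own statement) =====
-- stated objective: faster
-- what changed: B replaces A's inner loop that compares every query prefix against each word (O(|query|*L) string comparisons per word via a dict of prefix buckets) by computing each word's common-prefix length with the query once (O(L)) and appending the word only to the buckets it matches.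
import Mathlib
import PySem

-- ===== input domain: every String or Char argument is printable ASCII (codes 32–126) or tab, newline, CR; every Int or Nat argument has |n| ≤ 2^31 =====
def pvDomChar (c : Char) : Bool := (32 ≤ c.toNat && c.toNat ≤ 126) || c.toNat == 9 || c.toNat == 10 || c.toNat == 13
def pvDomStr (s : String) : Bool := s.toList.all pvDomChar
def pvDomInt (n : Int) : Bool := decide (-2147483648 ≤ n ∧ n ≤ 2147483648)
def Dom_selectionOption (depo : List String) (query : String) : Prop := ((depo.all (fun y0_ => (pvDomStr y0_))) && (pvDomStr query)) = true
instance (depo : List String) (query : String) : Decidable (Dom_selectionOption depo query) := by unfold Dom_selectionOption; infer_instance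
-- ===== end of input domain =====

-- B computes each word's common-prefix length with the query once instead of comparing the word
-- against every query prefix; objective: faster (fewer string comparisons per word).

-- ===== PORT A =====
-- literal transliteration of Source A; `datamap[item]` is ported as getD (item is always a key, so
-- Python's lookup never raises); `datamap[key].append` is Dict.modify.
def selectionOption (depo : List String) (query : String) : List (List String) :=
  let result : List (List String) := []
  if PySem.Str.len query < 2 then result else
  let query := PySem.Str.lower query
  let queryList := (PySem.List.pyRange 2 (PySem.Str.len query + 1) 1).map
      (fun idx => PySem.Str.slice query (some 0) (some idx))
  let datamap : PySem.Dict String (List String) :=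
      queryList.foldl (fun d key => d.insert key []) PySem.Dict.empty
  let depo2 := depo.map (fun word => PySem.Str.lower word)
  let datamap2 := depo2.foldl (fun d word =>
      d.keys.foldl (fun d key =>
          let subword := PySem.Str.slice word (some 0) (some (PySem.Str.len key))
          if key == subword then d.modify key [] (· ++ [word]) else d) d) datamap
  datamap2.keys.foldl (fun result item =>
      let data := PySem.List.sorted (datamap2.getD item []) id
      result ++ [PySem.List.slice data none (some 3)]) result

-- ===== PORT B =====
-- the `while m < n and m < len(w) and w[m] == q[m]: m += 1` loop of Source B, as structural recursion
-- over the two character lists (exact: PySem.Str.lower is characterwise, so len(q) = n).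
def pvCpl : List Char → List Char → Nat
  | a :: as, b :: bs => if a == b then pvCpl as bs + 1 else 0
  | _, _ => 0

def selectionOption_alt (depo : List String) (query : String) : List (List String) :=
  let n := PySem.Str.len query
  if n < 2 then [] else
  let q := PySem.Str.lower query
  let buckets : List (List String) := (List.range (n.toNat - 1)).map (fun _ => [])
  let buckets2 := depo.foldl (fun bs word =>
      let w := PySem.Str.lower word
      let m := pvCpl w.toList q.toList
      (PySem.List.pyRange 2 ((m : Int) + 1) 1).foldl
        (fun bs L => bs.modify (L - 2).toNat (· ++ [w])) bs) buckets
  buckets2.map (fun b => PySem.List.slice (PySem.List.sorted b id) none (some 3))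

-- ===== PRECONDITION & SPEC =====
def Spec_selectionOption (depo : List String) (query : String) (out : List (List String)) : Prop := out = selectionOption_alt depo query
instance (depo : List String) (query : String) (out : List (List String)) : Decidable (Spec_selectionOption depo query out) := by unfold Spec_selectionOption; infer_instance

-- ===== CLAIM (what is proved, stated in full; the proofs are below) =====
def Claim_equal_selectionOption : Prop := ∀ (depo : List String) (query : String), Dom_selectionOption depo query → Spec_selectionOption depo query (selectionOption depo query)

-- ===== LEMMAS AND PROOFS =====

-- the matching condition of A's inner loop, as a predicate on the (already lowered) word
def pvCondA (k w : String) : Bool := k == PySem.Str.slice w (some 0) (some (PySem.Str.len k))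

-- pyRange 2 (n+1) as a map over List.range
lemma pvRange_eq (n : Nat) :
    PySem.List.pyRange 2 ((n : Int) + 1) 1
      = (List.range (n - 1)).map (fun i : Nat => ((i : Int) + 2)) := by
  induction n with
  | zero => decide
  | succ m ih =>
    rcases Nat.eq_zero_or_pos m with h | h
    · subst h; decide
    · have h2 : (2 : Int) ≤ (m : Int) + 1 := by omega
      have hc : ((m + 1 : Nat) : Int) + 1 = ((m : Int) + 1) + 1 := by push_cast; ring
      rw [hc, PySem.List.pyRange_one_succ_right h2, ih]
      have hm : m + 1 - 1 = (m - 1) + 1 := by omega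
      rw [hm, List.range_succ, List.map_append]
      simp only [List.map_cons, List.map_nil]
      congr 2
      omega

-- filter (· == k) on a Nodup list
lemma pvFilter_beq_of_nodup {α : Type} [DecidableEq α] (l : List α) (k : α) (h : l.Nodup) :
    l.filter (fun x => x == k) = if k ∈ l then [k] else [] := by
  induction l with
  | nil => simp
  | cons a t ih =>
    rcases List.nodup_cons.mp h with ⟨ha, ht⟩
    by_cases hak : a = k
    · subst hak
      have hnil : t.filter (fun x => x == a) = [] := by
        apply List.filter_eq_nil_iff.mpr
        intro x hx
        simp only [beq_iff_eq]
        rintro rfl; exact ha hx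
      simp [hnil]
    · have hb : ¬ (a == k) = true := by simp [hak]
      have hka : ¬ k = a := fun hh => hak hh.symm
      simp [hb, ih ht, List.mem_cons, hka]

-- Set.update by elements already present is the identity
lemma pvSet_update_of_subset {α : Type} [BEq α] [LawfulBEq α] (s : PySem.Set α) (l : List α)
    (h : ∀ x ∈ l, x ∈ s) : PySem.Set.update s l = s := by
  induction l generalizing s with
  | nil => rfl
  | cons a t ih =>
    have hadd : PySem.Set.add s a = s := by
      simp [pysem, PySem.Set.add, h a (List.mem_cons_self)]
    simp only [PySem.Set.update, List.foldl_cons, hadd]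
    exact ih s (fun x hx => h x (List.mem_cons_of_mem _ hx))

-- common-prefix length ≥ L iff the L-prefixes agree (L ≤ |ys|)
lemma pvCpl_ge_iff (xs ys : List Char) (L : Nat) (h : L ≤ ys.length) :
    L ≤ pvCpl xs ys ↔ xs.take L = ys.take L := by
  induction xs generalizing ys L with
  | nil =>
    cases L with
    | zero => simp [pvCpl]
    | succ L' =>
      cases ys with
      | nil => simp at h
      | cons b bs => simp [pvCpl]
  | cons a as ih =>
    cases ys with
    | nil =>
      have hL : L = 0 := by simpa using h
      subst hL; simp
    | cons b bs =>
      cases L with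
      | zero => simp
      | succ L' =>
        by_cases hab : a = b
        · subst hab
          simp only [pvCpl, beq_self_eq_true, if_true, List.take_succ_cons, List.cons.injEq,
            true_and]
          have hL : L' ≤ bs.length := by simpa using h
          constructor
          · intro hh; exact (ih bs L' hL).mp (by omega)
          · intro hh; have := (ih bs L' hL).mpr hh; omega
        · have hb : ¬ (a == b) = true := by simp [hab]
          simp [pvCpl, hb, hab]

-- xs[0:b] = take b.toNat xs for 0 ≤ b
lemma pvSliceZero (xs : List Char) (b : Int) (hb : 0 ≤ b) :
    PySem.List.slice xs (some 0) (some b) = xs.take b.toNat := by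
  simp only [PySem.List.slice, hb, PySem.List.clampIdx_of_nonneg, Std.le_refl, Int.toNat_zero]
  rw [Nat.zero_min, List.drop_zero, Nat.sub_zero, List.take_eq_take_iff]
  omega

lemma pvStrSlice_toList (s : String) (b : Int) (hb : 0 ≤ b) :
    (PySem.Str.slice s (some 0) (some b)).toList = s.toList.take b.toNat := by
  simp only [PySem.Str.toList_slice, PySem.Chars.slice_eq_listSlice]
  exact pvSliceZero _ _ hb

-- length of the lowered string
lemma pvLowerLen (s : String) : (PySem.Str.lower s).toList.length = s.toList.length := by
  rw [PySem.Str.toList_lower]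
  simp [PySem.Chars.lower]

-- ----- A side -----

-- one pass of A's inner key loop
lemma pvA_inner (word : String) (d : PySem.Dict String (List String)) (hnd : d.keys.Nodup) :
    (d.keys.foldl (fun d key =>
        let subword := PySem.Str.slice word (some 0) (some (PySem.Str.len key))
        if key == subword then d.modify key [] (· ++ [word]) else d) d).keys = d.keys
    ∧ ∀ k, (d.keys.foldl (fun d key =>
        let subword := PySem.Str.slice word (some 0) (some (PySem.Str.len key))
        if key == subword then d.modify key [] (· ++ [word]) else d) d).getD k []
        = d.getD k [] ++ (if k ∈ d.keys ∧ pvCondA k word then [word] else []) := by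
  have hstep : (d.keys.foldl (fun d key =>
        let subword := PySem.Str.slice word (some 0) (some (PySem.Str.len key))
        if key == subword then d.modify key [] (· ++ [word]) else d) d)
      = (d.keys.filter (fun k => pvCondA k word)).foldl
          (fun d k => d.modify k [] (· ++ [word])) d := by
    rw [List.foldl_filter]
    rfl
  constructor
  · rw [hstep]
    have hke := PySem.Dict.keys_foldl_modify (d.keys.filter (fun k => pvCondA k word))
      ([] : List String) (fun _ _ => (· ++ [word])) d
    rw [hke]
    exact pvSet_update_of_subset _ _ (fun x hx => (List.mem_filter.mp hx).1)
  · intro k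
    rw [hstep]
    have hmap : (d.keys.filter (fun k => pvCondA k word)).foldl
          (fun d k => d.modify k [] (· ++ [word])) d
        = ((d.keys.filter (fun k => pvCondA k word)).map (fun k => (k, word))).foldl
          (fun d p => d.modify p.1 [] (· ++ [p.2])) d := by
      rw [List.foldl_map]
    rw [hmap, PySem.Dict.getD_foldl_modify_append]
    congr 1
    rw [List.filter_map]
    have hco : ((fun p : String × String => p.1 == k) ∘ (fun k' : String => (k', word)))
        = (fun x : String => x == k) := rfl
    rw [hco, List.map_map]
    have hnd2 : (d.keys.filter (fun k' => pvCondA k' word)).Nodup := hnd.filter _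
    rw [pvFilter_beq_of_nodup _ _ hnd2]
    by_cases hmem : k ∈ d.keys.filter (fun k' => pvCondA k' word)
    · obtain ⟨h1, h2⟩ := List.mem_filter.mp hmem
      simp [hmem, h1, h2]
    · have hxx : ¬ (k ∈ d.keys ∧ pvCondA k word = true) := by
        rintro ⟨h1, h2⟩; exact hmem (List.mem_filter.mpr ⟨h1, h2⟩)
      simp [hmem, hxx]

-- A's word loop: each key's bucket collects, in order, the lowered words matching it
lemma pvA_words (ws : List String) (d : PySem.Dict String (List String)) (hnd : d.keys.Nodup) :
    (ws.foldl (fun d word =>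
        d.keys.foldl (fun d key =>
          let subword := PySem.Str.slice word (some 0) (some (PySem.Str.len key))
          if key == subword then d.modify key [] (· ++ [word]) else d) d) d).keys = d.keys
    ∧ ∀ k ∈ d.keys, (ws.foldl (fun d word =>
        d.keys.foldl (fun d key =>
          let subword := PySem.Str.slice word (some 0) (some (PySem.Str.len key))
          if key == subword then d.modify key [] (· ++ [word]) else d) d) d).getD k []
        = d.getD k [] ++ ws.filter (fun w => pvCondA k w) := by
  induction ws generalizing d with
  | nil => simp
  | cons w ws ih =>
    obtain ⟨hk1, hv1⟩ := pvA_inner w d hnd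
    simp only [List.foldl_cons]
    obtain ⟨ihk, ihv⟩ := ih (d.keys.foldl (fun d key =>
        let subword := PySem.Str.slice w (some 0) (some (PySem.Str.len key))
        if key == subword then d.modify key [] (· ++ [w]) else d) d)
      (by rw [hk1]; exact hnd)
    constructor
    · rw [ihk, hk1]
    · intro k hk
      rw [ihv k (by rw [hk1]; exact hk), hv1 k, List.filter_cons]
      by_cases hc : pvCondA k w = true
      · simp [hc, hk, List.append_assoc]
      · simp [hc, hk]

-- after the dict-comprehension fold: getD is [] on every key
lemma pvA_init (l : List String) (d : PySem.Dict String (List String)) (c : String)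
    (h : d.getD c [] = []) :
    (l.foldl (fun d k => d.insert k []) d).getD c [] = [] := by
  induction l generalizing d with
  | nil => simpa
  | cons a t ih =>
    simp only [List.foldl_cons]
    apply ih
    by_cases hca : c = a
    · subst hca; exact PySem.Dict.getD_insert_self d c [] []
    · rw [show (d.insert a []).getD c [] = d.getD c [] from by simp [pysem, hca]]
      exact h

-- the dict comprehension over distinct fresh keys: keys are exactly those keys
lemma pvA_keys0 (l : List String) (hnd : l.Nodup) :
    (l.foldl (fun d k => d.insert k ([] : List String)) PySem.Dict.empty).keys = l := by
  have hitems := PySem.Dict.items_foldl_insert_fresh l (fun k => k) (fun _ => ([] : List String))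
    PySem.Dict.empty (fun a _ => PySem.Dict.contains_empty a) (by simpa using hnd)
  have hkeq : (l.foldl (fun d k => d.insert k ([] : List String)) PySem.Dict.empty).keys
      = ((l.foldl (fun d k => d.insert k ([] : List String)) PySem.Dict.empty).items).map Prod.fst := rfl
  rw [hkeq, hitems]
  have hco2 : (Prod.fst ∘ fun a : String => (a, ([] : List String))) = id := rfl
  simp only [PySem.Dict.empty, List.map_append, List.map_map, hco2, List.map_id]
  simp

-- ----- B side -----

-- one pass of B's bucket-append loop over range(2, m+1)
lemma pvB_inner (w : String) (m : Nat) (bs : List (List String)) :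
    ((PySem.List.pyRange 2 ((m : Int) + 1) 1).foldl
        (fun bs L => bs.modify (L - 2).toNat (· ++ [w])) bs).length = bs.length
    ∧ ∀ i v, bs[i]? = some v →
      ((PySem.List.pyRange 2 ((m : Int) + 1) 1).foldl
        (fun bs L => bs.modify (L - 2).toNat (· ++ [w])) bs)[i]?
        = some (v ++ if i + 2 ≤ m then [w] else []) := by
  induction m with
  | zero =>
    have hr : PySem.List.pyRange 2 (((0 : Nat) : Int) + 1) 1 = [] := by decide
    rw [hr]
    refine ⟨rfl, fun i v hv => ?_⟩
    simp [hv]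
  | succ m ih =>
    rcases Nat.eq_zero_or_pos m with h0 | h0
    · subst h0
      have hr : PySem.List.pyRange 2 (((1 : Nat) : Int) + 1) 1 = [] := by decide
      rw [hr]
      refine ⟨rfl, fun i v hv => ?_⟩
      simp [hv]
    · have hc : ((m + 1 : Nat) : Int) + 1 = ((m : Int) + 1) + 1 := by push_cast; ring
      have h2 : (2 : Int) ≤ (m : Int) + 1 := by omega
      rw [hc, PySem.List.pyRange_one_succ_right h2, List.foldl_append]
      obtain ⟨ihl, ihv⟩ := ih
      simp only [List.foldl_cons, List.foldl_nil]
      have hidx : (((m : Int) + 1) - 2).toNat = m - 1 := by omega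
      rw [hidx]
      constructor
      · rw [List.length_modify, ihl]
      · intro i v hv
        rw [List.getElem?_modify, ihv i v hv]
        by_cases him : m - 1 = i
        · have h1 : ¬ (i + 2 ≤ m) := by omega
          have h2' : i + 2 ≤ m + 1 := by omega
          simp [him, h1, h2']
        · by_cases hle : i + 2 ≤ m
          · simp [him, hle, show i + 2 ≤ m + 1 by omega]
          · have hle2 : ¬ i + 2 ≤ m + 1 := by omega
            simp [him, hle, hle2]

-- B's word loop, pointwise
lemma pvB_words (ws : List String) (qL : List Char) (bs : List (List String)) :
    ((ws.foldl (fun bs word =>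
        (PySem.List.pyRange 2 ((pvCpl (PySem.Str.lower word).toList qL : Int) + 1) 1).foldl
          (fun bs L => bs.modify (L - 2).toNat (· ++ [PySem.Str.lower word])) bs) bs)).length = bs.length
    ∧ ∀ i v, bs[i]? = some v →
      (ws.foldl (fun bs word =>
        (PySem.List.pyRange 2 ((pvCpl (PySem.Str.lower word).toList qL : Int) + 1) 1).foldl
          (fun bs L => bs.modify (L - 2).toNat (· ++ [PySem.Str.lower word])) bs) bs)[i]?
        = some (v ++ (ws.map PySem.Str.lower).filter
            (fun w => decide (i + 2 ≤ pvCpl w.toList qL))) := by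
  induction ws generalizing bs with
  | nil =>
    refine ⟨rfl, fun i v hv => ?_⟩
    simp [hv]
  | cons w ws ih =>
    simp only [List.foldl_cons]
    obtain ⟨hl1, hv1⟩ := pvB_inner (PySem.Str.lower w) (pvCpl (PySem.Str.lower w).toList qL) bs
    obtain ⟨ihl, ihv⟩ := ih ((PySem.List.pyRange 2 ((pvCpl (PySem.Str.lower w).toList qL : Int) + 1) 1).foldl
          (fun bs L => bs.modify (L - 2).toNat (· ++ [PySem.Str.lower w])) bs)
    constructor
    · rw [ihl, hl1]
    · intro i v hv
      rw [ihv i (v ++ (if i + 2 ≤ pvCpl (PySem.Str.lower w).toList qL then [PySem.Str.lower w] else []))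
        (hv1 i v hv)]
      simp only [List.map_cons, List.filter_cons, PySem.Str.toList_lower, decide_eq_true_eq]
      split_ifs with h <;> simp [List.append_assoc]

-- ----- the bridge between A's prefix test and B's common-prefix length -----

lemma pvCond_bridge (query : String) (i : Nat) (hn : i + 2 ≤ query.toList.length) (w : String) :
    pvCondA (PySem.Str.slice (PySem.Str.lower query) (some 0) (some ((i : Int) + 2))) w
      = decide (i + 2 ≤ pvCpl w.toList (PySem.Str.lower query).toList) := by
  set lq := PySem.Str.lower query with hlq
  have hb : (0 : Int) ≤ (i : Int) + 2 := by omega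
  have htn : ((i : Int) + 2).toNat = i + 2 := by omega
  have hk : (PySem.Str.slice lq (some 0) (some ((i : Int) + 2))).toList
      = lq.toList.take (i + 2) := by rw [pvStrSlice_toList _ _ hb, htn]
  have hlen : lq.toList.length = query.toList.length := pvLowerLen query
  have hklen : (PySem.Str.slice lq (some 0) (some ((i : Int) + 2))).toList.length = i + 2 := by
    rw [hk, List.length_take]
    omega
  have hlenk : PySem.Str.len (PySem.Str.slice lq (some 0) (some ((i : Int) + 2))) = (i : Int) + 2 := by
    rw [PySem.Str.len_eq, hklen]
    push_cast
    ring
  unfold pvCondA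
  rw [hlenk]
  have hsub : (PySem.Str.slice w (some 0) (some ((i : Int) + 2))).toList
      = w.toList.take (i + 2) := by
    have htn' : ((i : Int) + 2).toNat = i + 2 := by omega
    rw [pvStrSlice_toList _ _ hb, htn']
  have hiff : (PySem.Str.slice lq (some 0) (some ((i : Int) + 2))
        = PySem.Str.slice w (some 0) (some ((i : Int) + 2)))
      ↔ (i + 2 ≤ pvCpl w.toList lq.toList) := by
    constructor
    · intro he
      have : lq.toList.take (i + 2) = w.toList.take (i + 2) := by
        rw [← hk, ← hsub, he]
      exact (pvCpl_ge_iff w.toList lq.toList (i + 2) (by omega)).mpr this.symm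
    · intro hcp
      have : w.toList.take (i + 2) = lq.toList.take (i + 2) :=
        (pvCpl_ge_iff w.toList lq.toList (i + 2) (by omega)).mp hcp
      have htl : (PySem.Str.slice lq (some 0) (some ((i : Int) + 2))).toList
          = (PySem.Str.slice w (some 0) (some ((i : Int) + 2))).toList := by
        rw [hk, hsub, this]
      exact String.toList_inj.mp htl
  by_cases hcp : i + 2 ≤ pvCpl w.toList lq.toList
  · simp [hiff.mpr hcp, hcp]
  · have hne : ¬ (PySem.Str.slice lq (some 0) (some ((i : Int) + 2))
        = PySem.Str.slice w (some 0) (some ((i : Int) + 2))) := fun he => hcp (hiff.mp he)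
    simp [hcp, hne]

-- ===== VERDICT (by name: the statement is the Claim_ definition above) =====
set_option maxHeartbeats 2000000 in
theorem selectionOption_spec : Claim_equal_selectionOption := by
  intro depo query _
  unfold Spec_selectionOption selectionOption selectionOption_alt
  by_cases hlt : PySem.Str.len query < 2
  · simp only [if_pos hlt]
  · simp only [if_neg hlt]
    have hn2 : 2 ≤ query.toList.length := by
      rw [PySem.Str.len_eq] at hlt; omega
    set n := query.toList.length with hn
    set lq := PySem.Str.lower query with hlq
    have hlenlq : PySem.Str.len lq = (n : Int) := by
      rw [PySem.Str.len_eq, pvLowerLen]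
    have hlenq : (PySem.Str.len query).toNat = n := by
      rw [PySem.Str.len_eq]; omega
    rw [hlenlq, hlenq, pvRange_eq n, List.map_map]
    set keyF : Nat → String :=
      (fun idx => PySem.Str.slice lq (some 0) (some idx)) ∘ (fun i : Nat => (i : Int) + 2)
      with hkeyF
    set ql := (List.range (n - 1)).map keyF with hql
    -- the query prefixes are pairwise distinct (distinct lengths)
    have hkeylen : ∀ i, i < n - 1 → (keyF i).toList.length = i + 2 := by
      intro i hi
      have hb : (0 : Int) ≤ (i : Int) + 2 := by omega
      simp only [hkeyF, Function.comp]
      rw [pvStrSlice_toList _ _ hb]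
      have htn : ((i : Int) + 2).toNat = i + 2 := by omega
      rw [htn, List.length_take, pvLowerLen]
      omega
    have hqlNodup : ql.Nodup := by
      rw [hql]
      refine List.Nodup.map_on ?_ (List.nodup_range)
      intro x hx y hy hxy
      rw [List.mem_range] at hx hy
      have hlx := hkeylen x hx
      have hly := hkeylen y hy
      rw [hxy] at hlx
      omega
    have hkeys0 := pvA_keys0 ql hqlNodup
    have hinit : ∀ c, ((ql.foldl (fun d k => d.insert k ([] : List String))
        (PySem.Dict.empty : PySem.Dict String (List String)))).getD c [] = [] := by
      intro c
      exact pvA_init ql PySem.Dict.empty c rfl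
    obtain ⟨hkeysF, hgetF⟩ := pvA_words (depo.map (fun word => PySem.Str.lower word))
      (ql.foldl (fun d k => d.insert k ([] : List String))
        (PySem.Dict.empty : PySem.Dict String (List String))) (by rw [hkeys0]; exact hqlNodup)
    rw [hkeys0] at hkeysF hgetF
    rw [hkeysF]
    rw [PySem.List.foldl_append_singleton_eq_map]
    simp only [List.nil_append]
    -- B side
    obtain ⟨hBlen, hBget⟩ := pvB_words depo lq.toList
      ((List.range (n - 1)).map (fun _ => ([] : List String)))
    have hbs0len : (((List.range (n - 1)).map (fun _ => ([] : List String)))).length = n - 1 := by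
      simp
    -- both sides as maps; compare pointwise
    apply List.ext_getElem?
    intro i
    rw [List.getElem?_map, List.getElem?_map, List.getElem?_map]
    by_cases hi : i < n - 1
    · rw [List.getElem?_range hi]
      have hz : (((List.range (n - 1)).map (fun _ => ([] : List String))))[i]? = some [] := by
        rw [List.getElem?_map, List.getElem?_range hi]
        rfl
      rw [hBget i [] hz]
      simp only [Option.map_some, List.nil_append]
      refine congrArg some ?_
      have hmem : keyF i ∈ ql := by
        rw [hql]
        exact List.mem_map_of_mem (List.mem_range.mpr hi)
      rw [hgetF (keyF i) hmem, hinit, List.nil_append]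
      have hfil : (depo.map (fun word => PySem.Str.lower word)).filter
            (fun w => pvCondA (keyF i) w)
          = (depo.map PySem.Str.lower).filter
            (fun w => decide (i + 2 ≤ pvCpl w.toList lq.toList)) := by
        have hme : depo.map (fun word => PySem.Str.lower word) = depo.map PySem.Str.lower := rfl
        rw [hme]
        apply List.filter_congr
        intro w _
        have hbr := pvCond_bridge query i (by omega) w
        simpa [hkeyF, Function.comp, hlq] using hbr
      rw [hfil]
    · have hA : (List.range (n - 1))[i]? = none := by
        rw [List.getElem?_eq_none_iff]
        simpa using by omega
      have hB : ((depo.foldl (fun bs word =>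
          (PySem.List.pyRange 2 ((pvCpl (PySem.Str.lower word).toList lq.toList : Int) + 1) 1).foldl
            (fun bs L => bs.modify (L - 2).toNat (· ++ [PySem.Str.lower word])) bs)
          ((List.range (n - 1)).map (fun _ => ([] : List String)))))[i]? = none := by
        rw [List.getElem?_eq_none_iff, hBlen, hbs0len]
        omega
      rw [hA, hB]
      rfl
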